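-- pv_equiv track=rewrite | github.com/JinyangLi01/UnfairlyTreatedGroupDetection | Coding/Algorithms/DevelopingHistory/NewAlgRanking_definition2_6_20211206.py | GenerateChildrenAndChildrenRelatedToNewTuple
-- ===== SOURCE A (Python) =====
-- def GenerateChildrenAndChildrenRelatedToNewTuple(P, whole_data_frame, attributes, new_tuple):
--     children = []
--     children_related_to_new_tuple = []
--     length = len(P)
--     i = 0
--     for i in range(length - 1, -1, -1):
--         if P[i] != -1:
--             break
--     if P[i] == -1:
--         i -= 1
--     for j in range(i + 1, length, 1):
--         for a in range(int(whole_data_frame[attributes[j]]['min']), int(whole_data_frame[attributes[j]]['max']) + 1):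
--             s = P.copy()
--             s[j] = a
--             children.append(s)
--             if s[j] == new_tuple[j]:
--                 children_related_to_new_tuple.append(s)
--     return children, children_related_to_new_tuple
-- ===== SOURCE B (Python) =====
-- def GenerateChildrenAndChildrenRelatedToNewTuple(P, whole_data_frame, attributes, new_tuple):
--     length = len(P)
--     i = length - 1
--     while i >= 0 and P[i] == -1:
--         i -= 1
--     children = []
--     for j in range(i + 1, length):
--         col = whole_data_frame[attributes[j]]
--         lo, hi = int(col['min']), int(col['max'])
--         children.extend(P[:j] + [a] + P[j + 1:] for a in range(lo, hi + 1))
--     related = []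
--     for j in range(i + 1, length):
--         col = whole_data_frame[attributes[j]]
--         lo, hi = int(col['min']), int(col['max'])
--         if lo <= hi and lo <= new_tuple[j] <= hi:
--             related.append(P[:j] + [int(new_tuple[j])] + P[j + 1:])
--     return children, related
-- ===== Notes on version B (the rewrite author's own statement) =====
-- stated objective: alternative
-- what changed: The last-set index is found by a downward while-scan instead of a for/break loop, children are built per-column with slice concatenation instead of copy-and-assign, and the related children come from a separate direct pass that tests whether new_tuple[j] lies in [min,max] instead of comparing each enumerated value inside the inner loop.
import Mathlib
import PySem

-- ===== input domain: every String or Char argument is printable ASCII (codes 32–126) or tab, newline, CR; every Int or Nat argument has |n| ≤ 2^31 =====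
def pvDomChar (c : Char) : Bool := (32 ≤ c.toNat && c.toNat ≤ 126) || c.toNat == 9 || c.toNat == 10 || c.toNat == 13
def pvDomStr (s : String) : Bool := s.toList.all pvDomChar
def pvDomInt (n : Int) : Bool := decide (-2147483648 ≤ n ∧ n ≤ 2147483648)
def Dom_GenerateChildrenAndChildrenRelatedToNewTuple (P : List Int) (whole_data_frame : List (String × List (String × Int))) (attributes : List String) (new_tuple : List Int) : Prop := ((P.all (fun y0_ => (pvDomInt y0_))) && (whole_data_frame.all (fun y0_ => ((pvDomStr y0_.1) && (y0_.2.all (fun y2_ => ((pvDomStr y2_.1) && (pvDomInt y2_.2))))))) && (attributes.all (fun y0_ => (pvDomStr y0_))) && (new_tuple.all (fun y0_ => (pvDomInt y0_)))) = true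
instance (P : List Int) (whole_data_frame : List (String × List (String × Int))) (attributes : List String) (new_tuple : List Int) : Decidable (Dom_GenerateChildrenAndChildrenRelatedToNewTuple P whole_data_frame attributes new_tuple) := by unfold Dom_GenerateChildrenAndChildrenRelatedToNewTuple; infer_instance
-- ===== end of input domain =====

-- B computes the last-set index with a downward while-scan, builds children per-column by slice
-- concatenation, and computes the related children in a separate direct pass testing whether
-- new_tuple[j] lies in [min,max]; same return value as A wherever A returns (objective: alternative).

-- ===== PORT A =====
def GenerateChildrenAndChildrenRelatedToNewTuple (P : List Int) (whole_data_frame : List (String × List (String × Int))) (attributes : List String) (new_tuple : List Int) : List (List Int) × List (List Int) :=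
  let length : Int := P.length
  -- for i in range(length-1,-1,-1): if P[i] != -1: break   (state = (i, broken))
  let st := (PySem.List.pyRange (length - 1) (-1) (-1)).foldl
      (fun (st : Int × Bool) k =>
        if st.2 then st
        else if PySem.List.pyGetD P k (-1) ≠ -1 then (k, true) else (k, false))
      (0, false)
  -- if P[i] == -1: i -= 1   (P[i] raises on empty P in Python: outside Pre_)
  let i : Int := if PySem.List.pyGetD P st.1 (-1) = -1 then st.1 - 1 else st.1
  (PySem.List.pyRange (i + 1) length 1).foldl
    (fun (acc : List (List Int) × List (List Int)) j =>
      let col := ((PySem.Dict.mk whole_data_frame).get? (PySem.List.pyGetD attributes j "")).getD []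
      let lo := ((PySem.Dict.mk col).get? "min").getD 0
      let hi := ((PySem.Dict.mk col).get? "max").getD 0
      (PySem.List.pyRange lo (hi + 1) 1).foldl
        (fun (acc2 : List (List Int) × List (List Int)) a =>
          let s := PySem.List.pySetD P j a
          (acc2.1 ++ [s],
           if PySem.List.pyGetD s j 0 = PySem.List.pyGetD new_tuple j 0 then acc2.2 ++ [s]
           else acc2.2))
        acc)
    ([], [])

-- ===== PORT B =====
-- i = length-1; while i >= 0 and P[i] == -1: i -= 1    (argument = i+1, so fuel 0 means i < 0)
def bScanGC (P : List Int) : Nat → Int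
  | 0 => -1
  | n + 1 => if P.getD n 0 = -1 then bScanGC P n else (n : Int)

def GenerateChildrenAndChildrenRelatedToNewTuple_alt (P : List Int) (whole_data_frame : List (String × List (String × Int))) (attributes : List String) (new_tuple : List Int) : List (List Int) × List (List Int) :=
  let length : Int := P.length
  let i : Int := bScanGC P P.length
  let children := (PySem.List.pyRange (i + 1) length 1).foldl
    (fun (acc : List (List Int)) j =>
      let col := ((PySem.Dict.mk whole_data_frame).get? (PySem.List.pyGetD attributes j "")).getD []
      let lo := ((PySem.Dict.mk col).get? "min").getD 0
      let hi := ((PySem.Dict.mk col).get? "max").getD 0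
      acc ++ (PySem.List.pyRange lo (hi + 1) 1).map
        (fun a => PySem.List.slice P none (some j) ++ [a] ++ PySem.List.slice P (some (j + 1)) none))
    []
  let related := (PySem.List.pyRange (i + 1) length 1).foldl
    (fun (acc : List (List Int)) j =>
      let col := ((PySem.Dict.mk whole_data_frame).get? (PySem.List.pyGetD attributes j "")).getD []
      let lo := ((PySem.Dict.mk col).get? "min").getD 0
      let hi := ((PySem.Dict.mk col).get? "max").getD 0
      let t := PySem.List.pyGetD new_tuple j 0
      if lo ≤ hi ∧ lo ≤ t ∧ t ≤ hi then
        acc ++ [PySem.List.slice P none (some j) ++ [t] ++ PySem.List.slice P (some (j + 1)) none]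
      else acc)
    []
  (children, related)

-- ===== PRECONDITION & SPEC =====
-- last index of P holding a value ≠ -1, or -1 if there is none
def pvLastIdxGC (P : List Int) : Int :=
  match P.reverse.findIdx? (fun x => x ≠ -1) with
  | some m => (P.length : Int) - 1 - m
  | none => -1

-- column j is usable: attribute name exists, its dict has 'min' and 'max', and if the value
-- range is nonempty then new_tuple has an entry at j
def pvColOKGC (whole_data_frame : List (String × List (String × Int))) (attributes : List String) (new_tuple : List Int) (j : Nat) : Bool :=
  match attributes[j]? with
  | none => false
  | some name =>
    match (PySem.Dict.mk whole_data_frame).get? name with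
    | none => false
    | some col =>
      match (PySem.Dict.mk col).get? "min", (PySem.Dict.mk col).get? "max" with
      | some lo, some hi => !(decide (lo ≤ hi)) || decide (j < new_tuple.length)
      | _, _ => false

-- Pre_ = exactly the inputs where the Python A returns: P nonempty (else IndexError at P[0]),
-- and every scanned column j has a valid attribute lookup with 'min'/'max' keys and, when its
-- range is nonempty, an entry new_tuple[j].
def Pre_GenerateChildrenAndChildrenRelatedToNewTuple (P : List Int) (whole_data_frame : List (String × List (String × Int))) (attributes : List String) (new_tuple : List Int) : Prop :=
  P ≠ [] ∧ ∀ j < P.length, pvLastIdxGC P < (j : Int) → pvColOKGC whole_data_frame attributes new_tuple j = true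
instance (P : List Int) (whole_data_frame : List (String × List (String × Int))) (attributes : List String) (new_tuple : List Int) : Decidable (Pre_GenerateChildrenAndChildrenRelatedToNewTuple P whole_data_frame attributes new_tuple) := by unfold Pre_GenerateChildrenAndChildrenRelatedToNewTuple; infer_instance

def pvWitness_GenerateChildrenAndChildrenRelatedToNewTuple : List Int × (List (String × List (String × Int))) × List String × List Int :=
  ([-1], [("x", [("min", 0), ("max", 1)])], ["x"], [0])

def Spec_GenerateChildrenAndChildrenRelatedToNewTuple (P : List Int) (whole_data_frame : List (String × List (String × Int))) (attributes : List String) (new_tuple : List Int) (out : List (List Int) × List (List Int)) : Prop := out = GenerateChildrenAndChildrenRelatedToNewTuple_alt P whole_data_frame attributes new_tuple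
instance (P : List Int) (whole_data_frame : List (String × List (String × Int))) (attributes : List String) (new_tuple : List Int) (out : List (List Int) × List (List Int)) : Decidable (Spec_GenerateChildrenAndChildrenRelatedToNewTuple P whole_data_frame attributes new_tuple out) := by unfold Spec_GenerateChildrenAndChildrenRelatedToNewTuple; infer_instance

-- ===== CLAIM (what is proved, stated in full; the proofs are below) =====
def Claim_equal_GenerateChildrenAndChildrenRelatedToNewTuple : Prop := ∀ (P : List Int) (whole_data_frame : List (String × List (String × Int))) (attributes : List String) (new_tuple : List Int), Dom_GenerateChildrenAndChildrenRelatedToNewTuple P whole_data_frame attributes new_tuple → Pre_GenerateChildrenAndChildrenRelatedToNewTuple P whole_data_frame attributes new_tuple → Spec_GenerateChildrenAndChildrenRelatedToNewTuple P whole_data_frame attributes new_tuple (GenerateChildrenAndChildrenRelatedToNewTuple P whole_data_frame attributes new_tuple)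

-- ===== LEMMAS AND PROOFS =====

-- once the break flag is set, A's index-search fold keeps its state
theorem afold_true (P : List Int) (L : List Int) (k : Int) :
    L.foldl (fun (st : Int × Bool) k' =>
      if st.2 then st else if PySem.List.pyGetD P k' (-1) ≠ -1 then (k', true) else (k', false))
      (k, true) = (k, true) := by
  induction L with
  | nil => rfl
  | cons x xs ih => simpa using ih

-- characterisation of A's for/break fold by B's downward scan
theorem afold_gen (P : List Int) : ∀ (n : Nat), n ≤ P.length → ∀ (x : Int),
    (PySem.List.pyRange ((n : Int) - 1) (-1) (-1)).foldl
      (fun (st : Int × Bool) k =>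
        if st.2 then st else if PySem.List.pyGetD P k (-1) ≠ -1 then (k, true) else (k, false))
      (x, false)
    = if bScanGC P n = -1 then (if n = 0 then (x, false) else ((0 : Int), false))
      else (bScanGC P n, true) := by
  intro n
  induction n with
  | zero =>
    intro _ x
    rw [PySem.List.pyRange_neg_one_eq_nil (by norm_num)]
    simp [bScanGC]
  | succ n ih =>
    intro hn x
    have hn' : n < P.length := by omega
    have hcast : ((n + 1 : Nat) : Int) - 1 = (n : Int) := by push_cast; ring
    rw [hcast, PySem.List.pyRange_neg_one_cons (by omega), List.foldl_cons]
    have hget : PySem.List.pyGetD P ((n : Nat) : Int) (-1) = P[n] :=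
      PySem.List.pyGetD_ofNat P n (-1) hn'
    have hgetD : P.getD n 0 = P[n] := List.getD_eq_getElem P 0 hn'
    by_cases hp : P[n] = -1
    · have hb : bScanGC P (n + 1) = bScanGC P n := by rw [bScanGC, hgetD, if_pos hp]
      rw [hb]
      have step : (if ((x, false) : Int × Bool).2 then ((x, false) : Int × Bool)
          else if PySem.List.pyGetD P ((n : Nat) : Int) (-1) ≠ -1 then (((n : Nat) : Int), true)
          else (((n : Nat) : Int), false)) = (((n : Nat) : Int), false) := by
        simp [hget, hp]
      rw [step, ih (by omega) (n : Int)]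
      split_ifs with h1 h2 h3 <;> simp_all <;> omega
    · have step : (if ((x, false) : Int × Bool).2 then ((x, false) : Int × Bool)
          else if PySem.List.pyGetD P ((n : Nat) : Int) (-1) ≠ -1 then (((n : Nat) : Int), true)
          else (((n : Nat) : Int), false)) = (((n : Nat) : Int), true) := by
        simp [hget, hp]
      rw [step, afold_true]
      have hb : bScanGC P (n + 1) = (n : Int) := by rw [bScanGC, hgetD, if_neg hp]
      rw [hb]
      have : ((n : Nat) : Int) ≠ -1 := by omega
      simp [this]

-- B's scan either fails (-1) or returns a valid index holding a value ≠ -1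
theorem bScan_spec (P : List Int) : ∀ (n : Nat), n ≤ P.length →
    bScanGC P n = -1 ∨
      (0 ≤ bScanGC P n ∧ bScanGC P n < (n : Int) ∧ P.getD (bScanGC P n).toNat 0 ≠ -1) := by
  intro n
  induction n with
  | zero => intro _; left; rfl
  | succ n ih =>
    intro hn
    by_cases hp : P.getD n 0 = -1
    · have hrw : bScanGC P (n + 1) = bScanGC P n := by rw [bScanGC, if_pos hp]
      rw [hrw]
      rcases ih (by omega) with h | ⟨h1, h2, h3⟩
      · exact Or.inl h
      · exact Or.inr ⟨h1, by omega, h3⟩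
    · have hrw : bScanGC P (n + 1) = (n : Int) := by rw [bScanGC, if_neg hp]
      rw [hrw]
      right
      refine ⟨by omega, by omega, ?_⟩
      simpa using hp

-- if the scan fails, every scanned cell is -1
theorem bScan_neg_all (P : List Int) : ∀ (n : Nat), bScanGC P n = -1 →
    ∀ k < n, P.getD k 0 = -1 := by
  intro n
  induction n with
  | zero => intro _ k hk; omega
  | succ n ih =>
    intro h k hk
    by_cases hp : P.getD n 0 = -1
    · have hrw : bScanGC P (n + 1) = bScanGC P n := by rw [bScanGC, if_pos hp]
      rcases Nat.lt_succ_iff_lt_or_eq.mp hk with h' | h'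
      · exact ih (hrw ▸ h) k h'
      · exact h' ▸ hp
    · exfalso
      have hrw : bScanGC P (n + 1) = (n : Int) := by rw [bScanGC, if_neg hp]
      rw [hrw] at h
      omega

-- A's computed starting index equals B's
theorem i_eq (P : List Int) :
    (if PySem.List.pyGetD P
        (((PySem.List.pyRange ((P.length : Int) - 1) (-1) (-1)).foldl
          (fun (st : Int × Bool) k =>
            if st.2 then st else if PySem.List.pyGetD P k (-1) ≠ -1 then (k, true) else (k, false))
          (0, false)).1) (-1) = -1
     then ((PySem.List.pyRange ((P.length : Int) - 1) (-1) (-1)).foldl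
          (fun (st : Int × Bool) k =>
            if st.2 then st else if PySem.List.pyGetD P k (-1) ≠ -1 then (k, true) else (k, false))
          (0, false)).1 - 1
     else ((PySem.List.pyRange ((P.length : Int) - 1) (-1) (-1)).foldl
          (fun (st : Int × Bool) k =>
            if st.2 then st else if PySem.List.pyGetD P k (-1) ≠ -1 then (k, true) else (k, false))
          (0, false)).1) = bScanGC P P.length := by
  rw [afold_gen P P.length le_rfl 0]
  rcases bScan_spec P P.length le_rfl with hneg | ⟨h0, hlt, hne⟩
  · rw [hneg, if_pos rfl, ite_self]
    cases P with
    | nil => decide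
    | cons x xs =>
      have hx : (x :: xs).getD 0 0 = -1 :=
        bScan_neg_all (x :: xs) (x :: xs).length hneg 0 (by simp)
      simp only [List.getD_cons_zero] at hx
      simp [PySem.List.pyGetD_zero, hx]
  · have hst : (if bScanGC P P.length = -1
        then (if P.length = 0 then ((0 : Int), false) else ((0 : Int), false))
        else (bScanGC P P.length, true)) = (bScanGC P P.length, true) := if_neg (by omega)
    rw [hst]
    have hget : PySem.List.pyGetD P (bScanGC P P.length) (-1) = P[(bScanGC P P.length).toNat] :=
      PySem.List.pyGetD_eq_getElem P (-1) h0 (by omega)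
    have hgetD : P.getD (bScanGC P P.length).toNat 0 = P[(bScanGC P P.length).toNat] :=
      List.getD_eq_getElem P 0 (by omega)
    rw [hgetD] at hne
    simp [hget, hne]

-- writing cell j of P equals slicing around it
theorem set_eq_slice (P : List Int) (j : Int) (h0 : 0 ≤ j) (h : j < (P.length : Int)) (a : Int) :
    PySem.List.pySetD P j a =
      PySem.List.slice P none (some j) ++ [a] ++ PySem.List.slice P (some (j + 1)) none := by
  rw [PySem.List.pySetD_of_nonneg P a h0, PySem.List.slice_to P h0, PySem.List.slice_from P (by omega)]
  have h1 : (j + 1).toNat = j.toNat + 1 := by omega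
  have h2 : j.toNat < P.length := by omega
  rw [h1, List.set_eq_take_append_cons_drop, if_pos h2]
  simp

-- reading back the written cell
theorem get_set_self (P : List Int) (j a : Int) (h0 : 0 ≤ j) (h : j < (P.length : Int)) :
    PySem.List.pyGetD (PySem.List.pySetD P j a) j 0 = a := by
  rw [PySem.List.pySetD_of_nonneg P a h0,
    PySem.List.pyGetD_eq_getElem _ 0 h0 (by simpa using h)]
  rw [List.getElem_set_self]

-- A's inner enumeration fold, split into its two components
theorem inner_fold (P nt : List Int) (j : Int) (h0 : 0 ≤ j) (h : j < (P.length : Int)) (b : Int) :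
    ∀ (n : Nat) (lo : Int), (b - lo).toNat = n → ∀ (c r : List (List Int)),
    (PySem.List.pyRange lo b).foldl
      (fun (acc2 : List (List Int) × List (List Int)) a =>
        (acc2.1 ++ [PySem.List.pySetD P j a],
         if PySem.List.pyGetD (PySem.List.pySetD P j a) j 0 = PySem.List.pyGetD nt j 0
         then acc2.2 ++ [PySem.List.pySetD P j a] else acc2.2))
      (c, r)
    = (c ++ (PySem.List.pyRange lo b).map (fun a => PySem.List.pySetD P j a),
       r ++ (if lo ≤ PySem.List.pyGetD nt j 0 ∧ PySem.List.pyGetD nt j 0 < b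
             then [PySem.List.pySetD P j (PySem.List.pyGetD nt j 0)] else [])) := by
  intro n
  induction n with
  | zero =>
    intro lo hfuel c r
    rw [PySem.List.pyRange_one_eq_nil (by omega)]
    rw [if_neg (by omega)]
    simp
  | succ n ih =>
    intro lo hfuel c r
    have hlt : lo < b := by omega
    rw [PySem.List.pyRange_one_cons hlt, List.foldl_cons, List.map_cons]
    have hsj := get_set_self P j lo h0 h
    rw [hsj]
    by_cases heq : lo = PySem.List.pyGetD nt j 0
    · rw [if_pos heq, ih (lo + 1) (by omega)]
      have ht : PySem.List.pyGetD nt j 0 = lo := heq.symm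
      rw [if_neg (fun hcon => by rw [ht] at hcon; omega),
        if_pos (show lo ≤ PySem.List.pyGetD nt j 0 ∧ PySem.List.pyGetD nt j 0 < b by
          rw [ht]; exact ⟨le_refl lo, hlt⟩)]
      rw [ht]
      simp
    · rw [if_neg heq, ih (lo + 1) (by omega)]
      have hne : lo ≠ PySem.List.pyGetD nt j 0 := heq
      have hiff : (lo + 1 ≤ PySem.List.pyGetD nt j 0 ∧ PySem.List.pyGetD nt j 0 < b)
          ↔ (lo ≤ PySem.List.pyGetD nt j 0 ∧ PySem.List.pyGetD nt j 0 < b) := by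
        constructor <;> intro hh <;> exact ⟨by omega, hh.2⟩
      rw [if_congr hiff rfl rfl]
      simp

-- A's outer fold splits into B's two single-purpose folds
theorem outer_fold (P : List Int) (whole_data_frame : List (String × List (String × Int))) (attributes : List String) (new_tuple : List Int) :
    ∀ (J : List Int), (∀ j ∈ J, 0 ≤ j ∧ j < (P.length : Int)) → ∀ (c r : List (List Int)),
    J.foldl
      (fun (acc : List (List Int) × List (List Int)) j =>
        (PySem.List.pyRange
            (((PySem.Dict.mk (((PySem.Dict.mk whole_data_frame).get? (PySem.List.pyGetD attributes j "")).getD [])).get? "min").getD 0)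
            ((((PySem.Dict.mk (((PySem.Dict.mk whole_data_frame).get? (PySem.List.pyGetD attributes j "")).getD [])).get? "max").getD 0) + 1)).foldl
          (fun (acc2 : List (List Int) × List (List Int)) a =>
            (acc2.1 ++ [PySem.List.pySetD P j a],
             if PySem.List.pyGetD (PySem.List.pySetD P j a) j 0 = PySem.List.pyGetD new_tuple j 0
             then acc2.2 ++ [PySem.List.pySetD P j a] else acc2.2))
          acc)
      (c, r)
    = (J.foldl
        (fun (acc : List (List Int)) j =>
          acc ++ (PySem.List.pyRange
            (((PySem.Dict.mk (((PySem.Dict.mk whole_data_frame).get? (PySem.List.pyGetD attributes j "")).getD [])).get? "min").getD 0)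
            ((((PySem.Dict.mk (((PySem.Dict.mk whole_data_frame).get? (PySem.List.pyGetD attributes j "")).getD [])).get? "max").getD 0) + 1)).map
            (fun a => PySem.List.slice P none (some j) ++ [a] ++ PySem.List.slice P (some (j + 1)) none))
        c,
       J.foldl
        (fun (acc : List (List Int)) j =>
          if (((PySem.Dict.mk (((PySem.Dict.mk whole_data_frame).get? (PySem.List.pyGetD attributes j "")).getD [])).get? "min").getD 0) ≤ (((PySem.Dict.mk (((PySem.Dict.mk whole_data_frame).get? (PySem.List.pyGetD attributes j "")).getD [])).get? "max").getD 0) ∧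
             (((PySem.Dict.mk (((PySem.Dict.mk whole_data_frame).get? (PySem.List.pyGetD attributes j "")).getD [])).get? "min").getD 0) ≤ PySem.List.pyGetD new_tuple j 0 ∧
             PySem.List.pyGetD new_tuple j 0 ≤ (((PySem.Dict.mk (((PySem.Dict.mk whole_data_frame).get? (PySem.List.pyGetD attributes j "")).getD [])).get? "max").getD 0)
          then acc ++ [PySem.List.slice P none (some j) ++ [PySem.List.pyGetD new_tuple j 0] ++ PySem.List.slice P (some (j + 1)) none]
          else acc)
        r) := by
  intro J
  induction J with
  | nil => intro _ c r; rfl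
  | cons j J ih =>
    intro hJ c r
    obtain ⟨hj0, hjl⟩ := hJ j (List.mem_cons_self)
    simp only [List.foldl_cons]
    rw [inner_fold P new_tuple j hj0 hjl _ _ _ rfl c r]
    rw [ih (fun j' hj' => hJ j' (List.mem_cons_of_mem j hj'))]
    congr 1
    · congr 1
      congr 1
      exact List.map_congr_left (fun a _ => set_eq_slice P j hj0 hjl a)
    · congr 1
      by_cases hc : (((PySem.Dict.mk (((PySem.Dict.mk whole_data_frame).get? (PySem.List.pyGetD attributes j "")).getD [])).get? "min").getD 0) ≤ PySem.List.pyGetD new_tuple j 0 ∧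
          PySem.List.pyGetD new_tuple j 0 < ((((PySem.Dict.mk (((PySem.Dict.mk whole_data_frame).get? (PySem.List.pyGetD attributes j "")).getD [])).get? "max").getD 0) + 1)
      · rw [if_pos hc, if_pos ⟨by omega, hc.1, by omega⟩, set_eq_slice P j hj0 hjl]
      · rw [if_neg hc, if_neg (by omega)]
        simp

theorem ports_eq (P : List Int) (whole_data_frame : List (String × List (String × Int))) (attributes : List String) (new_tuple : List Int) :
    GenerateChildrenAndChildrenRelatedToNewTuple P whole_data_frame attributes new_tuple
      = GenerateChildrenAndChildrenRelatedToNewTuple_alt P whole_data_frame attributes new_tuple := by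
  simp only [GenerateChildrenAndChildrenRelatedToNewTuple,
    GenerateChildrenAndChildrenRelatedToNewTuple_alt]
  rw [i_eq P]
  have hbounds : ∀ j ∈ PySem.List.pyRange (bScanGC P P.length + 1) (P.length : Int),
      0 ≤ j ∧ j < (P.length : Int) := by
    intro j hj
    rw [PySem.List.mem_pyRange_one] at hj
    rcases bScan_spec P P.length le_rfl with hneg | ⟨h0, _, _⟩
    · constructor <;> omega
    · constructor <;> omega
  exact outer_fold P whole_data_frame attributes new_tuple _ hbounds [] []

-- ===== VERDICT (by name: the statement is the Claim_ definition above) =====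
theorem GenerateChildrenAndChildrenRelatedToNewTuple_spec : Claim_equal_GenerateChildrenAndChildrenRelatedToNewTuple := by
  intro P wdf attrs nt _ _
  exact ports_eq P wdf attrs nt
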